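-- pv_equiv track=rewrite | github.com/mic-max/advent | 2023/d13.py | find_hreflect
-- ===== SOURCE A (Python) =====
-- def find_hreflect(p):
--     result = []
--     middles = []
--     for i, line in enumerate(p):
--         if i >= len(p) - 1:
--             break
--         if line == p[i + 1]:
--             middles.append(i)
--
--     for mid in middles:
--         front = p[:mid][::-1]
--         back = p[mid+2:]
--         sames = all(a == b for a, b in zip(front, back))
--         if sames:
--             result.append(mid + 1)
--
--     return result
-- ===== SOURCE B (Python) =====
-- def find_hreflect(p):
--     n = len(p)
--     result = []
--     for mid in range(n - 1):
--         i, j = mid, mid + 1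
--         while i >= 0 and j < n and p[i] == p[j]:
--             i -= 1
--             j += 1
--         if i < 0 or j >= n:
--             result.append(mid + 1)
--     return result
-- ===== Notes on version B (the rewrite author's own statement) =====
-- stated objective: alternative
-- what changed: Replaced the two-pass scheme (collect adjacent-equal middles, then compare a reversed prefix slice against a suffix slice via zip/all) by a single pass that, for each split, expands two index pointers outward with early exit and no list copies.
import Mathlib
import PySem

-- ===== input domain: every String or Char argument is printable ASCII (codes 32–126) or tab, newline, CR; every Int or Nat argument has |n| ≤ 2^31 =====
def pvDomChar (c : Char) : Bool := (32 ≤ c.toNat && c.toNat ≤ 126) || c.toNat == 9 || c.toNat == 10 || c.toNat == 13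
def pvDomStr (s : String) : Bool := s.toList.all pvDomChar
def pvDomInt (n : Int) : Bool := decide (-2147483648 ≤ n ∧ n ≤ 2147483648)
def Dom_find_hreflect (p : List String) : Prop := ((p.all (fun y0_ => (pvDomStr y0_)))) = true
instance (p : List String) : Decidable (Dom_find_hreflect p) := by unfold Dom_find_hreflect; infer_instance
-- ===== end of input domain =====

-- B replaces A's two passes with slice/reverse/zip copies by one pass expanding two
-- index pointers outward with early exit (alternative decomposition, same worst-case cost).

-- ===== PORT A =====
-- first loop: 'for i, line in enumerate(p): if i >= len(p)-1: break; if line == p[i+1]: middles.append(i)'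
def pvMiddlesLoop (p : List String) : List (Int × String) → List Int → List Int
  | [], middles => middles
  | (i, line) :: rest, middles =>
    if i ≥ (p.length : Int) - 1 then middles
    else pvMiddlesLoop p rest
      (if PySem.List.pyGet? p (i + 1) = some line then middles ++ [i] else middles)

def find_hreflect (p : List String) : List Int :=
  let middles := pvMiddlesLoop p (PySem.List.enumerate p 0) []
  middles.foldl (fun result mid =>
    let front := (PySem.List.slice p none (some mid)).reverse  -- p[:mid][::-1] ([::-1] = reverse, exact)
    let back := PySem.List.slice p (some (mid + 2)) none       -- p[mid+2:]
    let sames := (front.zip back).all (fun ab => ab.1 == ab.2) -- all(a == b for a, b in zip(front, back))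
    if sames then result ++ [mid + 1] else result) []

-- ===== PORT B =====
-- 'while i >= 0 and j < n and p[i] == p[j]: i -= 1; j += 1' then test 'i < 0 or j >= n'
def pvExpand (p : List String) (i j : Int) : Bool :=
  if i < 0 ∨ (p.length : Int) ≤ j then true
  else
    match PySem.List.pyGet? p i, PySem.List.pyGet? p j with
    | some a, some b => if a == b then pvExpand p (i - 1) (j + 1) else false
    | _, _ => false
termination_by ((p.length : Int) - j).toNat
decreasing_by omega

def find_hreflect_alt (p : List String) : List Int :=
  (PySem.List.pyRange 0 ((p.length : Int) - 1) 1).foldl (fun result mid =>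
    if pvExpand p mid (mid + 1) then result ++ [mid + 1] else result) []

-- ===== PRECONDITION & SPEC =====
def Spec_find_hreflect (p : List String) (out : List Int) : Prop := out = find_hreflect_alt p
instance (p : List String) (out : List Int) : Decidable (Spec_find_hreflect p out) := by unfold Spec_find_hreflect; infer_instance

-- ===== CLAIM (what is proved, stated in full; the proofs are below) =====
def Claim_equal_find_hreflect : Prop := ∀ (p : List String), Dom_find_hreflect p → Spec_find_hreflect p (find_hreflect p)

-- ===== LEMMAS AND PROOFS =====

-- the adjacent-equality test of A's first loop, as a Bool on the index
def pvCondM (p : List String) (i : Int) : Bool :=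
  PySem.List.pyGet? p (i + 1) = some (PySem.List.pyGetD p i "")

-- A's first loop collects exactly the indices 0..len-2 whose line equals the next line
theorem pvMiddlesLoop_eq (p : List String) (q : List String) (s : Int) (acc : List Int)
    (hs : 0 ≤ s) (hq : q = p.drop s.toNat) (hlen : s + q.length = p.length) :
    pvMiddlesLoop p (PySem.List.enumerate q s) acc
      = acc ++ (PySem.List.pyRange s ((p.length : Int) - 1) 1).filter (pvCondM p) := by
  induction q generalizing s acc with
  | nil =>
    rw [PySem.List.enumerate_nil, PySem.List.pyRange_one_eq_nil (by simp at hlen; omega)]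
    simp [pvMiddlesLoop]
  | cons x rest ih =>
    rw [PySem.List.enumerate_cons]
    simp only [List.length_cons] at hlen
    show (if s ≥ (p.length : Int) - 1 then acc else _) = _
    by_cases hb : s ≥ (p.length : Int) - 1
    · rw [if_pos hb, PySem.List.pyRange_one_eq_nil (by omega)]
      simp
    · rw [if_neg hb]
      have hsN : s.toNat < p.length := by omega
      have hx : x = p[s.toNat] := by
        have := List.drop_eq_getElem_cons hsN
        rw [← hq] at this
        exact (List.cons_eq_cons.mp this).1
      have hrest : rest = p.drop (s + 1).toNat := by
        have := List.drop_eq_getElem_cons hsN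
        rw [← hq] at this
        have h2 := (List.cons_eq_cons.mp this).2
        rw [h2]; congr 1; omega
      rw [PySem.List.pyRange_one_cons (by omega), List.filter_cons]
      have hcond : pvCondM p s = (PySem.List.pyGet? p (s + 1) = some x : Bool) := by
        unfold pvCondM
        rw [PySem.List.pyGetD_eq_getElem p "" hs (by omega), hx]
      by_cases hc : PySem.List.pyGet? p (s + 1) = some x
      · rw [if_pos hc, ih (s + 1) (acc ++ [s]) (by omega) hrest (by omega)]
        have : pvCondM p s = true := by rw [hcond]; simp [hc]
        simp [this]
      · rw [if_neg hc, ih (s + 1) acc (by omega) hrest (by omega)]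
        have : pvCondM p s = false := by rw [hcond]; simp [hc]
        simp [this]

-- the two-pointer expansion equals the reversed-prefix / suffix pairwise comparison
theorem pvExpand_eq_aux (p : List String) (n : Nat) :
    ∀ (i j : Int), (p.length : Int) - j ≤ n → i < (p.length : Int) → 0 ≤ j →
    pvExpand p i j
      = (((p.take (i + 1).toNat).reverse.zip (p.drop j.toNat)).all (fun ab => ab.1 == ab.2)) := by
  induction n with
  | zero =>
    intro i j hn hi hj
    have hdrop : p.drop j.toNat = [] := List.drop_eq_nil_of_le (by omega)
    rw [pvExpand]
    simp [hdrop, show i < 0 ∨ (p.length : Int) ≤ j from Or.inr (by omega)]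
  | succ n ih =>
    intro i j hn hi hj
    by_cases h1 : i < 0 ∨ (p.length : Int) ≤ j
    · rw [pvExpand, if_pos h1]
      rcases h1 with h1 | h1
      · have : (i + 1).toNat = 0 := by omega
        simp [this]
      · have hdrop : p.drop j.toNat = [] := List.drop_eq_nil_of_le (by omega)
        simp [hdrop]
    · push Not at h1
      obtain ⟨hi0, hjlen⟩ := h1
      have hiN : i.toNat < p.length := by omega
      have hjN : j.toNat < p.length := by omega
      rw [pvExpand, if_neg (by omega),
        PySem.List.pyGet?_eq_some_getElem p hi0 hi,
        PySem.List.pyGet?_eq_some_getElem p hj hjlen]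
      have h1' : (i + 1).toNat = i.toNat + 1 := by omega
      have htake : p.take (i.toNat + 1) = p.take i.toNat ++ [p[i.toNat]] := by
        rw [List.take_add_one]; simp [List.getElem?_eq_getElem hiN]
      have hdrop : p.drop j.toNat = p[j.toNat] :: p.drop (j.toNat + 1) :=
        List.drop_eq_getElem_cons hjN
      rw [h1', htake, hdrop]
      simp only [List.reverse_append, List.reverse_singleton, List.singleton_append,
        List.zip_cons_cons, List.all_cons]
      by_cases heq : p[i.toNat] = p[j.toNat]
      · have hIH := ih (i - 1) (j + 1) (by omega) (by omega) (by omega)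
        have h2 : (i - 1 + 1).toNat = i.toNat := by omega
        have h3 : (j + 1).toNat = j.toNat + 1 := by omega
        rw [h2, h3] at hIH
        simp [heq, hIH]
      · simp [heq]

theorem pvExpand_eq (p : List String) (i j : Int) (hi : i < (p.length : Int)) (hj : 0 ≤ j) :
    pvExpand p i j
      = (((p.take (i + 1).toNat).reverse.zip (p.drop j.toNat)).all (fun ab => ab.1 == ab.2)) :=
  pvExpand_eq_aux p ((p.length : Int) - j).toNat i j (by omega) hi hj

theorem find_hreflect_spec_aux (p : List String) : find_hreflect p = find_hreflect_alt p := by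
  unfold find_hreflect find_hreflect_alt
  rw [pvMiddlesLoop_eq p p 0 [] (le_refl 0) (by simp) (by simp)]
  rw [PySem.List.foldl_append_if
    (fun mid => (((PySem.List.slice p none (some mid)).reverse.zip
      (PySem.List.slice p (some (mid + 2)) none)).all (fun ab => ab.1 == ab.2)))
    (fun mid => mid + 1)]
  rw [PySem.List.foldl_append_if (fun mid => pvExpand p mid (mid + 1)) (fun mid => mid + 1)]
  simp only [List.nil_append, List.filter_filter]
  congr 1
  apply List.filter_congr
  intro mid hmid
  rw [PySem.List.mem_pyRange_one] at hmid
  obtain ⟨h0, h1⟩ := hmid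
  have hmidN : mid.toNat < p.length := by omega
  have hmid1N : (mid + 1).toNat < p.length := by omega
  have hS : (((PySem.List.slice p none (some mid)).reverse.zip
      (PySem.List.slice p (some (mid + 2)) none)).all (fun ab => ab.1 == ab.2))
      = pvExpand p (mid - 1) (mid + 2) := by
    rw [PySem.List.slice_to p h0, PySem.List.slice_from p (by omega),
      pvExpand_eq p (mid - 1) (mid + 2) (by omega) (by omega)]
    have : mid - 1 + 1 = mid := by omega
    rw [this]
  rw [hS]
  conv_rhs => rw [pvExpand]
  rw [if_neg (show ¬(mid < 0 ∨ (p.length : Int) ≤ mid + 1) by omega),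
    PySem.List.pyGet?_eq_some_getElem p h0 (by omega),
    PySem.List.pyGet?_eq_some_getElem p (show (0:Int) ≤ mid + 1 by omega) (by omega)]
  unfold pvCondM
  rw [PySem.List.pyGetD_eq_getElem p "" h0 (by omega),
    PySem.List.pyGet?_eq_some_getElem p (show (0:Int) ≤ mid + 1 by omega) (by omega)]
  have h2 : mid + 1 + 1 = mid + 2 := by omega
  by_cases heq : p[mid.toNat] = p[(mid + 1).toNat]
  · simp [heq, h2]
  · have hfa : decide (p[(mid + 1).toNat] = p[mid.toNat]) = false := by
      simp
      intro h
      exact heq h.symm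
    simp [heq, hfa]

-- ===== VERDICT (by name: the statement is the Claim_ definition above) =====
theorem find_hreflect_spec : Claim_equal_find_hreflect := by
  intro p _
  unfold Spec_find_hreflect
  exact find_hreflect_spec_aux p
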